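-- pv_equiv track=rewrite | github.com/PurnenduMondal/BIwithAI | backend/app/services/dashboard/generator.py | _generate_dashboard_name
-- ===== SOURCE A (Python) =====
-- from typing import Dict, List, Any
--
-- def _generate_dashboard_name(schema: Dict) -> str:
--     """Generate descriptive dashboard name based on data"""
--     metric_names = [m.lower() for m in schema.get('metrics', {}).keys()]
--
--     # Try to infer business domain
--     if any('sales' in m or 'revenue' in m for m in metric_names):
--         return "Sales Performance Dashboard"
--     elif any('customer' in m or 'user' in m for m in metric_names):
--         return "Customer Analytics Dashboard"
--     elif any('marketing' in m or 'campaign' in m for m in metric_names):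
--         return "Marketing Dashboard"
--     elif any('product' in m or 'inventory' in m for m in metric_names):
--         return "Product Analytics Dashboard"
--     else:
--         return "Business Intelligence Dashboard"
-- ===== SOURCE B (Python) =====
-- _NAMES = [
--     "Sales Performance Dashboard",
--     "Customer Analytics Dashboard",
--     "Marketing Dashboard",
--     "Product Analytics Dashboard",
--     "Business Intelligence Dashboard",
-- ]
--
-- def _rank(m):
--     """Priority rank of one lowercased metric name (0 = highest, 4 = no match)."""
--     if 'sales' in m or 'revenue' in m:
--         return 0
--     if 'customer' in m or 'user' in m:
--         return 1
--     if 'marketing' in m or 'campaign' in m: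
--         return 2
--     if 'product' in m or 'inventory' in m:
--         return 3
--     return 4
--
-- def _generate_dashboard_name(schema):
--     """Generate descriptive dashboard name based on data"""
--     best = 4
--     for m in schema.get('metrics', {}):
--         r = _rank(m.lower())
--         if r < best:
--             best = r
--             if best == 0:
--                 break
--     return _NAMES[best]
-- ===== Notes on version B (the rewrite author's own statement) =====
-- stated objective: alternative
-- what changed: Instead of four separate any(...) sweeps over the metric list in elif order, B makes a single pass over the metrics, computing each metric's priority rank (0-4) once and keeping the minimum rank with an early exit at 0, then indexes a name table with that minimum.
import Mathlib
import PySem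

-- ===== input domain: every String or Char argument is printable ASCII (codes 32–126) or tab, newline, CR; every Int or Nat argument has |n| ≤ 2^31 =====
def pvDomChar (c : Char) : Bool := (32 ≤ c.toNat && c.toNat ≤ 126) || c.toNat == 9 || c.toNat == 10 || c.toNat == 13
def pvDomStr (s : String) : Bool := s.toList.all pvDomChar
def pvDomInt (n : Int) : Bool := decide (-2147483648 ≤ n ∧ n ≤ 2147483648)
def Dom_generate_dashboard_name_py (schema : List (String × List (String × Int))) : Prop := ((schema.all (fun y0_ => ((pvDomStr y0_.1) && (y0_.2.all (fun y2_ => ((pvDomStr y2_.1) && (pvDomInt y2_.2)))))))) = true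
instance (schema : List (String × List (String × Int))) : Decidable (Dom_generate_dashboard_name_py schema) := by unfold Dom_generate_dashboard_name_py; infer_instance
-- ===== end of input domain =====

-- B replaces A's four separate any(...) sweeps with a single pass over the metrics keeping the
-- minimum per-metric priority rank (early exit at 0), then indexes a name table; alternative, same cost.

-- ===== PORT A =====
def generate_dashboard_name_py (schema : List (String × List (String × Int))) : String :=
  let metric_names : List String :=
    ((PySem.Dict.mk ((PySem.Dict.mk schema).getD "metrics" [])).keys).map PySem.Str.lower
  if metric_names.any (fun m => PySem.Str.isIn "sales" m || PySem.Str.isIn "revenue" m) then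
    "Sales Performance Dashboard"
  else if metric_names.any (fun m => PySem.Str.isIn "customer" m || PySem.Str.isIn "user" m) then
    "Customer Analytics Dashboard"
  else if metric_names.any (fun m => PySem.Str.isIn "marketing" m || PySem.Str.isIn "campaign" m) then
    "Marketing Dashboard"
  else if metric_names.any (fun m => PySem.Str.isIn "product" m || PySem.Str.isIn "inventory" m) then
    "Product Analytics Dashboard"
  else
    "Business Intelligence Dashboard"

-- ===== PORT B =====
def pvNames : List String :=
  [ "Sales Performance Dashboard",
    "Customer Analytics Dashboard",
    "Marketing Dashboard",
    "Product Analytics Dashboard",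
    "Business Intelligence Dashboard" ]

-- priority rank of one lowercased metric name (0 = highest, 4 = no match); mirrors Source B's _rank
def pvRank (m : String) : Nat :=
  if PySem.Str.isIn "sales" m || PySem.Str.isIn "revenue" m then 0
  else if PySem.Str.isIn "customer" m || PySem.Str.isIn "user" m then 1
  else if PySem.Str.isIn "marketing" m || PySem.Str.isIn "campaign" m then 2
  else if PySem.Str.isIn "product" m || PySem.Str.isIn "inventory" m then 3
  else 4

-- the single loop of Source B: minimum rank so far, break as soon as it hits 0
def pvBestLoop : List String → Nat → Nat
  | [], best => best
  | m :: rest, best =>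
      let r := pvRank (PySem.Str.lower m)
      if r < best then
        if r = 0 then r else pvBestLoop rest r
      else pvBestLoop rest best

def generate_dashboard_name_py_alt (schema : List (String × List (String × Int))) : String :=
  let ks : List String := (PySem.Dict.mk ((PySem.Dict.mk schema).getD "metrics" [])).keys
  pvNames.getD (pvBestLoop ks 4) ""

-- ===== PRECONDITION & SPEC =====
def Spec_generate_dashboard_name_py (schema : List (String × List (String × Int))) (out : String) : Prop := out = generate_dashboard_name_py_alt schema
instance (schema : List (String × List (String × Int))) (out : String) : Decidable (Spec_generate_dashboard_name_py schema out) := by unfold Spec_generate_dashboard_name_py; infer_instance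

-- ===== CLAIM (what is proved, stated in full; the proofs are below) =====
def Claim_equal_generate_dashboard_name_py : Prop := ∀ (schema : List (String × List (String × Int))), Dom_generate_dashboard_name_py schema → Spec_generate_dashboard_name_py schema (generate_dashboard_name_py schema)

-- ===== LEMMAS AND PROOFS =====

-- proof-only: the minimum rank over a list of (raw) metric keys
def pvMinRank : List String → Nat
  | [] => 4
  | m :: rest => min (pvRank (PySem.Str.lower m)) (pvMinRank rest)

theorem pvRank_le_four (m : String) : pvRank m ≤ 4 := by
  unfold pvRank; split_ifs <;> omega

theorem pvMinRank_le_four (ms : List String) : pvMinRank ms ≤ 4 := by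
  induction ms with
  | nil => simp [pvMinRank]
  | cons m rest ih => simp [pvMinRank]; omega

theorem pvBestLoop_eq_min (ms : List String) :
    ∀ best, best ≤ 4 → pvBestLoop ms best = min best (pvMinRank ms) := by
  induction ms with
  | nil => intro best h; simp [pvBestLoop, pvMinRank]; omega
  | cons m rest ih =>
      intro best h
      have hr := pvRank_le_four (PySem.Str.lower m)
      simp only [pvBestLoop, pvMinRank]
      split_ifs with h1 h2
      · have := pvMinRank_le_four rest
        omega
      · rw [ih _ (by omega)]; omega
      · rw [ih _ h]; omega

theorem pvMinRank_le_of_mem {ms : List String} {m : String} (hm : m ∈ ms) :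
    pvMinRank ms ≤ pvRank (PySem.Str.lower m) := by
  induction ms with
  | nil => cases hm
  | cons x rest ih =>
      simp [pvMinRank]
      rcases List.mem_cons.mp hm with h | h
      · subst h; left; rfl
      · right; exact ih h

theorem le_pvMinRank {ms : List String} {k : Nat} (hk : k ≤ 4)
    (h : ∀ m ∈ ms, k ≤ pvRank (PySem.Str.lower m)) : k ≤ pvMinRank ms := by
  induction ms with
  | nil => simpa [pvMinRank]
  | cons x rest ih =>
      simp only [pvMinRank, le_min_iff]
      exact ⟨h x (List.mem_cons_self), ih (fun m hm => h m (List.mem_cons_of_mem _ hm))⟩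


-- per-element rank facts used to pin down the minimum in each branch
theorem pvRank_eq0 {m : String} (h : (PySem.Str.isIn "sales" m || PySem.Str.isIn "revenue" m) = true) :
    pvRank m = 0 := by unfold pvRank; rw [h]; simp

theorem pvRank_le1 {m : String} (h : (PySem.Str.isIn "customer" m || PySem.Str.isIn "user" m) = true) :
    pvRank m ≤ 1 := by unfold pvRank; rw [h]; split_ifs <;> first | omega | simp_all

theorem pvRank_le2 {m : String} (h : (PySem.Str.isIn "marketing" m || PySem.Str.isIn "campaign" m) = true) :
    pvRank m ≤ 2 := by unfold pvRank; rw [h]; split_ifs <;> first | omega | simp_all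

theorem pvRank_le3 {m : String} (h : (PySem.Str.isIn "product" m || PySem.Str.isIn "inventory" m) = true) :
    pvRank m ≤ 3 := by unfold pvRank; rw [h]; split_ifs <;> first | omega | simp_all

theorem pvRank_ge1 {m : String} (h : (PySem.Str.isIn "sales" m || PySem.Str.isIn "revenue" m) = false) :
    1 ≤ pvRank m := by unfold pvRank; rw [h]; split_ifs <;> first | omega | simp_all

theorem pvRank_ge2 {m : String}
    (h0 : (PySem.Str.isIn "sales" m || PySem.Str.isIn "revenue" m) = false)
    (h1 : (PySem.Str.isIn "customer" m || PySem.Str.isIn "user" m) = false) :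
    2 ≤ pvRank m := by unfold pvRank; rw [h0, h1]; split_ifs <;> first | omega | simp_all

theorem pvRank_ge3 {m : String}
    (h0 : (PySem.Str.isIn "sales" m || PySem.Str.isIn "revenue" m) = false)
    (h1 : (PySem.Str.isIn "customer" m || PySem.Str.isIn "user" m) = false)
    (h2 : (PySem.Str.isIn "marketing" m || PySem.Str.isIn "campaign" m) = false) :
    3 ≤ pvRank m := by unfold pvRank; rw [h0, h1, h2]; split_ifs <;> first | omega | simp_all

theorem pvRank_ge4 {m : String}
    (h0 : (PySem.Str.isIn "sales" m || PySem.Str.isIn "revenue" m) = false)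
    (h1 : (PySem.Str.isIn "customer" m || PySem.Str.isIn "user" m) = false)
    (h2 : (PySem.Str.isIn "marketing" m || PySem.Str.isIn "campaign" m) = false)
    (h3 : (PySem.Str.isIn "product" m || PySem.Str.isIn "inventory" m) = false) :
    4 ≤ pvRank m := by unfold pvRank; rw [h0, h1, h2, h3]; simp

-- the heart of the proof: A's if/elif chain over the lowered keys equals B's table lookup at the minimum rank
theorem chain_eq_minrank (ks : List String) :
    (if (ks.map PySem.Str.lower).any (fun m => PySem.Str.isIn "sales" m || PySem.Str.isIn "revenue" m) then
      "Sales Performance Dashboard"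
    else if (ks.map PySem.Str.lower).any (fun m => PySem.Str.isIn "customer" m || PySem.Str.isIn "user" m) then
      "Customer Analytics Dashboard"
    else if (ks.map PySem.Str.lower).any (fun m => PySem.Str.isIn "marketing" m || PySem.Str.isIn "campaign" m) then
      "Marketing Dashboard"
    else if (ks.map PySem.Str.lower).any (fun m => PySem.Str.isIn "product" m || PySem.Str.isIn "inventory" m) then
      "Product Analytics Dashboard"
    else "Business Intelligence Dashboard")
    = pvNames.getD (pvBestLoop ks 4) "" := by
  rw [pvBestLoop_eq_min ks 4 (le_refl 4)]
  have hmin4 : min 4 (pvMinRank ks) = pvMinRank ks := by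
    have := pvMinRank_le_four ks; omega
  rw [hmin4]
  simp only [List.any_map, Function.comp_def]
  by_cases h0 : ks.any (fun m => PySem.Str.isIn "sales" (PySem.Str.lower m) || PySem.Str.isIn "revenue" (PySem.Str.lower m))
  · rcases List.any_eq_true.mp h0 with ⟨m, hm, hc⟩
    have hv : pvMinRank ks = 0 := by
      have := pvMinRank_le_of_mem hm
      rw [pvRank_eq0 hc] at this; omega
    rw [if_pos h0, hv]; rfl
  · have hall0 : ∀ m ∈ ks, (PySem.Str.isIn "sales" (PySem.Str.lower m) || PySem.Str.isIn "revenue" (PySem.Str.lower m)) = false := by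
      simpa using List.any_eq_false.mp (eq_false_of_ne_true h0)
    by_cases h1 : ks.any (fun m => PySem.Str.isIn "customer" (PySem.Str.lower m) || PySem.Str.isIn "user" (PySem.Str.lower m))
    · rcases List.any_eq_true.mp h1 with ⟨m, hm, hc⟩
      have hv : pvMinRank ks = 1 := by
        have hu := pvMinRank_le_of_mem hm
        have hl := le_pvMinRank (by omega) (fun m hm => pvRank_ge1 (hall0 m hm))
        have := pvRank_le1 hc; omega
      rw [if_neg h0, if_pos h1, hv]; rfl
    · have hall1 : ∀ m ∈ ks, (PySem.Str.isIn "customer" (PySem.Str.lower m) || PySem.Str.isIn "user" (PySem.Str.lower m)) = false := by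
        simpa using List.any_eq_false.mp (eq_false_of_ne_true h1)
      by_cases h2 : ks.any (fun m => PySem.Str.isIn "marketing" (PySem.Str.lower m) || PySem.Str.isIn "campaign" (PySem.Str.lower m))
      · rcases List.any_eq_true.mp h2 with ⟨m, hm, hc⟩
        have hv : pvMinRank ks = 2 := by
          have hu := pvMinRank_le_of_mem hm
          have hl := le_pvMinRank (by omega) (fun m hm => pvRank_ge2 (hall0 m hm) (hall1 m hm))
          have := pvRank_le2 hc; omega
        rw [if_neg h0, if_neg h1, if_pos h2, hv]; rfl
      · have hall2 : ∀ m ∈ ks, (PySem.Str.isIn "marketing" (PySem.Str.lower m) || PySem.Str.isIn "campaign" (PySem.Str.lower m)) = false := by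
          simpa using List.any_eq_false.mp (eq_false_of_ne_true h2)
        by_cases h3 : ks.any (fun m => PySem.Str.isIn "product" (PySem.Str.lower m) || PySem.Str.isIn "inventory" (PySem.Str.lower m))
        · rcases List.any_eq_true.mp h3 with ⟨m, hm, hc⟩
          have hv : pvMinRank ks = 3 := by
            have hu := pvMinRank_le_of_mem hm
            have hl := le_pvMinRank (by omega) (fun m hm => pvRank_ge3 (hall0 m hm) (hall1 m hm) (hall2 m hm))
            have := pvRank_le3 hc; omega
          rw [if_neg h0, if_neg h1, if_neg h2, if_pos h3, hv]; rfl
        · have hall3 : ∀ m ∈ ks, (PySem.Str.isIn "product" (PySem.Str.lower m) || PySem.Str.isIn "inventory" (PySem.Str.lower m)) = false := by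
            simpa using List.any_eq_false.mp (eq_false_of_ne_true h3)
          have hv : pvMinRank ks = 4 := by
            have hl := le_pvMinRank (le_refl 4) (fun m hm => pvRank_ge4 (hall0 m hm) (hall1 m hm) (hall2 m hm) (hall3 m hm))
            have := pvMinRank_le_four ks; omega
          rw [if_neg h0, if_neg h1, if_neg h2, if_neg h3, hv]; rfl

-- ===== VERDICT (by name: the statement is the Claim_ definition above) =====
theorem generate_dashboard_name_py_spec : Claim_equal_generate_dashboard_name_py := by
  intro schema _
  unfold Spec_generate_dashboard_name_py generate_dashboard_name_py generate_dashboard_name_py_alt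
  exact chain_eq_minrank _
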